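-- pv_equiv track=rewrite | github.com/VasanthVanan/leet-code-challenges | easy/1370.py | function
-- ===== SOURCE A (Python) =====
-- def function(inputs):
--     def append(hashmap, order):
--         appended = ""
--         for i in sorted(hashmap.keys(), reverse=order):
--             if(hashmap[i]):
--                 appended += i
--                 hashmap[i] = int(hashmap[i]) - 1
--         return [appended, hashmap]
--     # create a dictionary of letters and their corresponding values
--     hashmap = {}
--     strings = ""
--     for i in inputs:
--         if i not in hashmap:
--             hashmap[i] = 1
--         else:
--             hashmap[i] += 1
--     while(sum(list(hashmap.values()))):
--         # append ASCII characters to the string in ascending order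
--         temp, hashmap = append(hashmap, False)
--         strings += temp
--         # append ASCII characters to the string in descending order
--         if(sum(list(hashmap.values()))):
--             temp, hashmap = append(hashmap, True)
--             strings += temp
--     return strings
-- ===== SOURCE B (Python) =====
-- def function(inputs):
--     # Build a per-level bucket table letter-major (each letter drops itself into
--     # levels 1..count), then read the table out level-major, reversing even levels.
--     counts = {}
--     for ch in inputs:
--         counts[ch] = counts.get(ch, 0) + 1
--     m = max(counts.values(), default=0)
--     buckets = [[] for _ in range(m + 1)]
--     for c in sorted(counts):
--         for p in range(1, counts[c] + 1):
--             buckets[p].append(c)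
--     out = []
--     for p in range(1, m + 1):
--         b = buckets[p]
--         if p % 2 == 0:
--             b = list(reversed(b))
--         out.append(''.join(b))
--     return ''.join(out)
-- ===== Notes on version B (the rewrite author's own statement) =====
-- stated objective: alternative
-- what changed: B counts characters once, builds a per-level bucket table letter-major (each distinct letter, taken in ascending order, drops itself into buckets 1..count), and then reads the table out level-major reversing even levels - replacing A's repeated sort-mutate-and-decrement passes over a shared dict with a build-then-read transpose over a bucket array.
import Mathlib
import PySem

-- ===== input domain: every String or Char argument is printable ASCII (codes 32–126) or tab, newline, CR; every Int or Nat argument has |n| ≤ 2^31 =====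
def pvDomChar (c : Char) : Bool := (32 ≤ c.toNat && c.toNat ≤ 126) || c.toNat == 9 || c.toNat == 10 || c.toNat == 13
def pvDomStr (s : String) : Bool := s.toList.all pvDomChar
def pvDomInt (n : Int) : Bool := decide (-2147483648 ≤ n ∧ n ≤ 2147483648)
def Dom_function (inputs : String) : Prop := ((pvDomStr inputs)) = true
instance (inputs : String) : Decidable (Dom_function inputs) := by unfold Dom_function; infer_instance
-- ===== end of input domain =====

-- B counts once, fills a per-level bucket table letter-major (each letter into buckets 1..count),
-- then reads it out level-major (even levels reversed) — instead of A's repeated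
-- sort-and-decrement passes over a mutated dict.

-- ===== PORT A =====
-- inner helper `append(hashmap, order)`: one sorted pass, appending each char with a
-- non-zero remaining count and decrementing it (strings modelled as List Char)
def functionAppend (hm : PySem.Dict Char Int) (order : Bool) : List Char × PySem.Dict Char Int :=
  (PySem.List.sorted hm.keys (fun x => x) order).foldl
    (fun st i =>
      let v := st.2.getD i 0
      if v ≠ 0 then (st.1 ++ [i], st.2.insert i (v - 1)) else st)
    ([], hm)

-- the `while(sum(list(hashmap.values())))` loop; fuel = |inputs| bounds the number of
-- iterations (each iteration removes at least one character), both exits return `strings`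
def functionLoop : Nat → PySem.Dict Char Int → List Char → List Char
  | 0, _, strings => strings
  | fuel + 1, hm, strings =>
    if hm.values.sum ≠ 0 then
      let r1 := functionAppend hm false
      let strings1 := strings ++ r1.1
      if r1.2.values.sum ≠ 0 then
        let r2 := functionAppend r1.2 true
        functionLoop fuel r2.2 (strings1 ++ r2.1)
      else
        functionLoop fuel r1.2 strings1
    else strings

def function (inputs : String) : String :=
  let hashmap := inputs.toList.foldl
    (fun d i => if d.contains i = false then d.insert i 1 else d.insert i (d.getD i 0 + 1))
    PySem.Dict.empty
  String.ofList (functionLoop inputs.toList.length hashmap [])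

-- ===== PORT B =====
def function_alt (inputs : String) : String :=
  let counts := inputs.toList.foldl (fun d ch => d.insert ch (d.getD ch 0 + 1)) PySem.Dict.empty
  let m := (PySem.List.max? counts.values (fun x => x)).getD 0
  -- `buckets = [[] for _ in range(m + 1)]`
  let buckets0 := (PySem.List.pyRange 0 (m + 1) 1).map (fun _ => ([] : List Char))
  -- `for c in sorted(counts): for p in range(1, counts[c] + 1): buckets[p].append(c)`
  -- p ranges over 1..counts[c] (all nonnegative and < len(buckets)), so `.toNat` is exact here
  let buckets := (PySem.List.sorted counts.keys (fun x => x) false).foldl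
    (fun bs c =>
      (PySem.List.pyRange 1 (counts.getD c 0 + 1) 1).foldl
        (fun bs p => bs.modify p.toNat (· ++ [c])) bs)
    buckets0
  -- `b = buckets[p]` with 1 ≤ p ≤ m < len(buckets): always in range, so pyGetD is exact
  let out := (PySem.List.pyRange 1 (m + 1) 1).foldl
    (fun acc p =>
      let b := PySem.List.pyGetD buckets p []
      acc ++ (if PySem.Int.mod p 2 == 0 then b.reverse else b))
    ([] : List Char)
  String.ofList out

-- ===== PRECONDITION & SPEC =====
def Spec_function (inputs : String) (out : String) : Prop := out = function_alt inputs
instance (inputs : String) (out : String) : Decidable (Spec_function inputs out) := by unfold Spec_function; infer_instance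

-- ===== CLAIM (what is proved, stated in full; the proofs are below) =====
def Claim_equal_function : Prop := ∀ (inputs : String), Dom_function inputs → Spec_function inputs (function inputs)

-- ===== LEMMAS AND PROOFS =====

-- the distinct characters of the input, in first-occurrence order
def pvK (n : List Char) : List Char := PySem.Set.ofList n
-- the distinct characters, ascending
def pvS (n : List Char) : List Char := PySem.List.sorted (pvK n) (fun x => x) false
-- the maximal multiplicity (0 for the empty input), exactly as B computes it
def pvM (n : List Char) : Int :=
  (PySem.List.max? ((pvK n).map (fun c => (n.count c : Int))) (fun x => x)).getD 0

-- one frequency level, with its direction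
def pvLvl (n : List Char) (p : Int) : List Char :=
  if PySem.Int.mod p 2 == 0 then ((pvS n).filter (fun c => decide (p ≤ (n.count c : Int)))).reverse
  else (pvS n).filter (fun c => decide (p ≤ (n.count c : Int)))

-- all levels from j+1 up to pvM
def pvLevels (n : List Char) (j : Int) : List Char :=
  (PySem.List.pyRange (j + 1) (pvM n + 1) 1).flatMap (pvLvl n)

theorem pvM_le_len (n : List Char) : pvM n ≤ (n.length : Int) := by
  unfold pvM
  cases h : PySem.List.max? ((pvK n).map (fun c => (n.count c : Int))) (fun x => x) with
  | none => simp
  | some m =>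
    obtain ⟨c, _, rfl⟩ := List.mem_map.mp (PySem.List.max?_mem h)
    simp only [Option.getD_some, Nat.cast_le]
    exact List.count_le_length

-- the remaining-count sum is non-zero exactly below the top level
theorem pv_sum_ne_iff (n : List Char) (j : Int) (hj : 0 ≤ j) :
    ((pvK n).map (fun c => max ((n.count c : Int) - j) 0)).sum ≠ 0 ↔ j < pvM n := by
  unfold pvM
  cases h : PySem.List.max? ((pvK n).map (fun c => (n.count c : Int))) (fun x => x) with
  | none =>
    have hnil : pvK n = [] := List.map_eq_nil_iff.mp ((PySem.List.max?_eq_none_iff _ _).mp h)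
    simp [hnil]; omega
  | some m =>
    have hmax := PySem.List.max?_isMax h
    obtain ⟨c0, hc0, hm⟩ := List.mem_map.mp (PySem.List.max?_mem h)
    simp only [Option.getD_some]
    constructor
    · intro hsum
      by_contra hle
      apply hsum
      apply List.sum_eq_zero
      intro x hx
      obtain ⟨c, hc, rfl⟩ := List.mem_map.mp hx
      have := hmax _ (List.mem_map_of_mem hc)
      simp only at this
      omega
    · intro hlt
      have hmem : max ((n.count c0 : Int) - j) 0 ∈ (pvK n).map (fun c => max ((n.count c : Int) - j) 0) :=
        List.mem_map_of_mem hc0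
      have hle := List.single_le_sum (l := (pvK n).map (fun c => max ((n.count c : Int) - j) 0))
        (by intro x hx; obtain ⟨c, hc, rfl⟩ := List.mem_map.mp hx; omega) _ hmem
      omega

-- one decrement step on the clamped counts
theorem pvGetD_step (n : List Char) (j : Int) (hj : 0 ≤ j) (ks : List Char)
    (hks : ∀ c, c ∈ ks ↔ c ∈ n) (c : Char) :
    (if c ∈ ks ∧ max ((n.count c : Int) - j) 0 ≠ 0 then max ((n.count c : Int) - j) 0 - 1
     else max ((n.count c : Int) - j) 0) = max ((n.count c : Int) - (j + 1)) 0 := by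
  by_cases hc : c ∈ n
  · have h1 : 0 < n.count c := List.count_pos_iff.mpr hc
    simp only [hks, hc, true_and]
    split_ifs <;> omega
  · have h0 : n.count c = 0 := List.count_eq_zero.mpr hc
    simp only [hks, hc, false_and, if_false]
    rw [h0]; simp; omega

-- descending sort of the distinct characters is the reversed ascending sort
theorem pv_sorted_true (n : List Char) :
    PySem.List.sorted (pvK n) (fun x => x) true = (pvS n).reverse := by
  apply PySem.List.sorted_rev_eq_of_perm_of_pairwise_gt
  · exact (List.reverse_perm _).trans (PySem.List.sorted_perm _ _ _)
  · exact List.pairwise_reverse.mpr (by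
      have := PySem.List.sorted_ofList_pairwise_lt (xs := n)
      exact this.imp (fun h => h))

-- the fold inside `append`: collects the characters of ks with non-zero count (in order)
-- and decrements exactly those counts
theorem pv_pass_foldl (ks : List Char) (d : PySem.Dict Char Int) (acc : List Char)
    (hnd : ks.Nodup) (hsub : ∀ k ∈ ks, k ∈ d.keys) :
    (ks.foldl (fun st i =>
        let v := st.2.getD i 0
        if v ≠ 0 then (st.1 ++ [i], st.2.insert i (v - 1)) else st) (acc, d)).1
      = acc ++ ks.filter (fun c => decide (d.getD c 0 ≠ 0))
    ∧ (ks.foldl (fun st i =>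
        let v := st.2.getD i 0
        if v ≠ 0 then (st.1 ++ [i], st.2.insert i (v - 1)) else st) (acc, d)).2.keys = d.keys
    ∧ ∀ c, (ks.foldl (fun st i =>
        let v := st.2.getD i 0
        if v ≠ 0 then (st.1 ++ [i], st.2.insert i (v - 1)) else st) (acc, d)).2.getD c 0
      = if c ∈ ks ∧ d.getD c 0 ≠ 0 then d.getD c 0 - 1 else d.getD c 0 := by
  induction ks generalizing d acc with
  | nil => simp
  | cons k t ih =>
    obtain ⟨hknt, htnd⟩ := List.nodup_cons.mp hnd
    have hkmem : k ∈ d.keys := hsub k (List.mem_cons_self)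
    simp only [List.foldl_cons]
    by_cases hv : d.getD k 0 ≠ 0
    · rw [if_pos hv]
      have hsub' : ∀ x ∈ t, x ∈ (d.insert k (d.getD k 0 - 1)).keys := fun x hx =>
        (PySem.Dict.mem_keys_insert d k x _).mpr (Or.inr (hsub x (List.mem_cons_of_mem _ hx)))
      have hgd' : ∀ c ∈ t, (d.insert k (d.getD k 0 - 1)).getD c 0 = d.getD c 0 := fun c hc =>
        PySem.Dict.getD_insert_of_ne d _ _ (fun he => hknt (he ▸ hc))
      obtain ⟨ih1, ih2, ih3⟩ := ih (d.insert k (d.getD k 0 - 1)) (acc ++ [k]) htnd hsub'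
      refine ⟨?_, ?_, ?_⟩
      · rw [ih1, List.filter_congr (fun c hc => by rw [hgd' c hc]), List.filter_cons]
        simp [hv]
      · rw [ih2]
        exact PySem.Dict.keys_insert_of_contains d _ ((PySem.Dict.contains_iff_mem_keys d k).mpr hkmem)
      · intro c
        rw [ih3 c]
        by_cases hck : c = k
        · subst hck
          simp [hknt, PySem.Dict.getD_insert_self, hv]
        · rw [PySem.Dict.getD_insert_of_ne d _ _ hck]
          simp [hck]
    · rw [if_neg hv]
      obtain ⟨ih1, ih2, ih3⟩ := ih d acc htnd (fun x hx => hsub x (List.mem_cons_of_mem _ hx))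
      refine ⟨?_, ih2, ?_⟩
      · rw [ih1, List.filter_cons]
        simp [hv]
      · intro c
        rw [ih3 c]
        by_cases hck : c = k
        · subst hck; simp [hv]
        · simp [hck]

-- a loop whose remaining sum is zero returns its accumulator unchanged (any fuel)
theorem pv_loop_done (fuel : Nat) (d : PySem.Dict Char Int) (acc : List Char)
    (h : d.values.sum = 0) : functionLoop fuel d acc = acc := by
  cases fuel <;> simp [functionLoop, h]

-- main loop invariant: from an even pass index j with clamped counts max(count-j,0),
-- the loop appends exactly the levels j+1 .. pvM n
theorem pv_loop_eq (n : List Char) (fuel : Nat) (j : Int) (d : PySem.Dict Char Int)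
    (acc : List Char) (hj : 0 ≤ j) (hje : j % 2 = 0)
    (hk : d.keys = pvK n)
    (hg : ∀ c, d.getD c 0 = max ((n.count c : Int) - j) 0)
    (hfuel : pvM n - j ≤ (fuel : Int)) :
    functionLoop fuel d acc = acc ++ pvLevels n j := by
  induction fuel generalizing j d acc with
  | zero =>
    have h0 : pvM n + 1 ≤ j + 1 := by push_cast at hfuel; omega
    simp [functionLoop, pvLevels, PySem.List.pyRange_one_eq_nil h0]
  | succ fuel ih =>
    have hnodupK : (pvK n).Nodup := PySem.Set.nodup_ofList n
    have hnodup : d.keys.Nodup := hk ▸ hnodupK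
    have hvals : d.values.sum = ((pvK n).map (fun c => max ((n.count c : Int) - j) 0)).sum := by
      rw [PySem.Dict.values_eq_map_keys d hnodup 0, hk]
      exact congrArg List.sum (List.map_congr_left (fun c _ => hg c))
    simp only [functionLoop]
    by_cases hs : d.values.sum ≠ 0
    · rw [if_pos hs]
      have hjM : j < pvM n := (pv_sum_ne_iff n j hj).mp (by rw [← hvals]; exact hs)
      have hKS : PySem.List.sorted d.keys (fun x : Char => x) false = pvS n := by
        rw [hk]; rfl
      have hSnodup : (pvS n).Nodup :=
        (PySem.List.sorted_perm (pvK n) (fun x => x) false).nodup_iff.mpr hnodupK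
      have hSmem : ∀ c : Char, c ∈ pvS n ↔ c ∈ n := by
        intro c
        unfold pvS pvK
        rw [PySem.List.mem_sorted, PySem.Set.mem_ofList]
      have hSsub : ∀ x ∈ pvS n, x ∈ d.keys := by
        intro x hx
        rw [hk]
        unfold pvS at hx
        exact (PySem.List.mem_sorted _ _ _ _).mp hx
      obtain ⟨h1, h2, h3⟩ := pv_pass_foldl (pvS n) d [] hSnodup hSsub
      have hk1 : (functionAppend d false).2.keys = pvK n := by
        simp only [functionAppend, hKS]
        rw [h2, hk]
      have hg1 : ∀ c, (functionAppend d false).2.getD c 0 = max ((n.count c : Int) - (j + 1)) 0 := by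
        intro c
        simp only [functionAppend, hKS]
        rw [h3 c, hg c]
        exact pvGetD_step n j hj (pvS n) hSmem c
      have hstr1 : (functionAppend d false).1
          = (pvS n).filter (fun c => decide ((j + 1 : Int) ≤ (n.count c : Int))) := by
        have hc1 : List.filter (fun c => decide (d.getD c 0 ≠ 0)) (pvS n)
            = List.filter (fun c => decide ((j + 1 : Int) ≤ (n.count c : Int))) (pvS n) :=
          List.filter_congr (fun c _ => by rw [hg c]; exact decide_eq_decide.mpr (by omega))
        simp only [functionAppend, hKS]
        rw [h1, hc1]
        simp
      have hnodup1 : (functionAppend d false).2.keys.Nodup := hk1 ▸ hnodupK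
      have hvals1 : (functionAppend d false).2.values.sum
          = ((pvK n).map (fun c => max ((n.count c : Int) - (j + 1)) 0)).sum := by
        rw [PySem.Dict.values_eq_map_keys _ hnodup1 0, hk1]
        exact congrArg List.sum (List.map_congr_left (fun c _ => hg1 c))
      have hmod1 : PySem.Int.mod (j + 1) 2 = 1 := by
        rw [PySem.Int.mod_eq_emod_of_pos (by norm_num)]; omega
      have hl1 : pvLvl n (j + 1)
          = (pvS n).filter (fun c => decide ((j + 1 : Int) ≤ (n.count c : Int))) := by
        simp only [pvLvl, hmod1]
        norm_num
      set d1 := (functionAppend d false).2 with hd1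
      by_cases hs2 : (j + 1) < pvM n
      · rw [if_pos (show d1.values.sum ≠ 0 by
          rw [hvals1]; exact (pv_sum_ne_iff n (j + 1) (by omega)).mpr hs2)]
        have hKS2 : PySem.List.sorted d1.keys (fun x : Char => x) true = (pvS n).reverse := by
          rw [hk1]; exact pv_sorted_true n
        have hRnodup : (pvS n).reverse.Nodup := by simpa using hSnodup
        have hRmem : ∀ c : Char, c ∈ (pvS n).reverse ↔ c ∈ n := by
          intro c; rw [List.mem_reverse]; exact hSmem c
        have hRsub : ∀ x ∈ (pvS n).reverse, x ∈ d1.keys := by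
          intro x hx
          rw [hk1]
          have hx' : x ∈ pvS n := List.mem_reverse.mp hx
          unfold pvS at hx'
          exact (PySem.List.mem_sorted _ _ _ _).mp hx'
        obtain ⟨g1, g2, g3⟩ := pv_pass_foldl ((pvS n).reverse) d1 [] hRnodup hRsub
        have hadd : j + 1 + 1 = j + 2 := by ring
        have hk2 : (functionAppend d1 true).2.keys = pvK n := by
          simp only [functionAppend, hKS2]
          rw [g2, hk1]
        have hg2 : ∀ c, (functionAppend d1 true).2.getD c 0 = max ((n.count c : Int) - (j + 2)) 0 := by
          intro c
          simp only [functionAppend, hKS2]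
          rw [g3 c, hg1 c]
          have h := pvGetD_step n (j + 1) (by omega) ((pvS n).reverse) hRmem c
          rw [hadd] at h
          exact h
        have hstr2 : (functionAppend d1 true).1
            = ((pvS n).filter (fun c => decide ((j + 2 : Int) ≤ (n.count c : Int)))).reverse := by
          have hc2 : List.filter (fun c => decide (d1.getD c 0 ≠ 0)) ((pvS n).reverse)
              = List.filter (fun c => decide ((j + 2 : Int) ≤ (n.count c : Int))) ((pvS n).reverse) :=
            List.filter_congr (fun c _ => by rw [hg1 c]; exact decide_eq_decide.mpr (by omega))
          simp only [functionAppend, hKS2]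
          rw [g1, hc2, List.filter_reverse]
          simp
        have hmod2 : PySem.Int.mod (j + 2) 2 = 0 := by
          rw [PySem.Int.mod_eq_emod_of_pos (by norm_num)]; omega
        rw [ih (j + 2) (functionAppend d1 true).2 _ (by omega) (by omega) hk2 hg2
          (by push_cast at hfuel ⊢; omega)]
        rw [hstr1, hstr2]
        unfold pvLevels
        rw [PySem.List.pyRange_one_cons (show (j : Int) + 1 < pvM n + 1 by omega),
            PySem.List.pyRange_one_cons (show (j : Int) + 1 + 1 < pvM n + 1 by omega),
            hadd, List.flatMap_cons, List.flatMap_cons]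
        have hl2 : pvLvl n (j + 2)
            = ((pvS n).filter (fun c => decide ((j + 2 : Int) ≤ (n.count c : Int)))).reverse := by
          simp only [pvLvl, hmod2]
          norm_num
        rw [hl1, hl2]
        simp [List.append_assoc]
      · have hz : d1.values.sum = 0 := by
          rw [hvals1]
          by_contra hnz
          exact hs2 ((pv_sum_ne_iff n (j + 1) (by omega)).mp hnz)
        rw [if_neg (by simp only [hz]; omega)]
        rw [pv_loop_done fuel _ _ hz, hstr1]
        have hM : pvM n = j + 1 := by omega
        unfold pvLevels
        rw [hM, PySem.List.pyRange_one_singleton]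
        simp only [List.flatMap_cons, List.flatMap_nil, List.append_nil]
        rw [hl1]
    · rw [if_neg hs]
      have hM : pvM n ≤ j := by
        by_contra h
        exact hs (by rw [hvals]; exact (pv_sum_ne_iff n j hj).mpr (by omega))
      simp [pvLevels, PySem.List.pyRange_one_eq_nil (show pvM n + 1 ≤ j + 1 by omega)]

-- the two counting loops build the same dict
theorem pv_build_eq (n : List Char) :
    n.foldl (fun d i => if d.contains i = false then d.insert i 1 else d.insert i (d.getD i 0 + 1))
      (PySem.Dict.empty : PySem.Dict Char Int)
    = n.foldl (fun d ch => d.insert ch (d.getD ch 0 + 1)) (PySem.Dict.empty : PySem.Dict Char Int) := by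
  congr 1
  funext d i
  by_cases h : d.contains i = false
  · rw [if_pos h, PySem.Dict.getD_of_not_contains d 0 h]
    norm_num
  · rw [if_neg h]

-- ---- B-side: the bucket fill ----

-- filling one letter into buckets 1..k: lengths preserved, bucket i gains [c] iff 1 ≤ i ≤ k
theorem pv_fill_one (c : Char) (k : Int) (bs : List (List Char)) :
    ((PySem.List.pyRange 1 (k + 1) 1).foldl (fun bs p => bs.modify p.toNat (· ++ [c])) bs).length
      = bs.length
    ∧ ∀ i : Nat,
      ((PySem.List.pyRange 1 (k + 1) 1).foldl (fun bs p => bs.modify p.toNat (· ++ [c])) bs)[i]?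
        = bs[i]?.map (fun b => b ++ if 1 ≤ (i : Int) ∧ (i : Int) ≤ k then [c] else []) := by
  by_cases hk : k ≤ 0
  · rw [PySem.List.pyRange_one_eq_nil (by omega)]
    refine ⟨rfl, fun i => ?_⟩
    cases hb : bs[i]? with
    | none => simp [hb]
    | some b =>
      simp only [List.foldl_nil, hb, Option.map_some]
      rw [if_neg (show ¬ (1 ≤ (i : Int) ∧ (i : Int) ≤ k) by omega)]
      simp
  · push Not at hk
    have hkt : k = ((k.toNat : Int)) := by omega
    obtain ⟨t, ht⟩ : ∃ t : Nat, k = (t : Int) := ⟨k.toNat, by omega⟩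
    subst ht
    clear hk hkt
    induction t generalizing bs with
    | zero =>
      rw [PySem.List.pyRange_one_eq_nil (by omega)]
      refine ⟨rfl, fun i => ?_⟩
      cases hb : bs[i]? with
      | none => simp [hb]
      | some b =>
        simp only [List.foldl_nil, hb, Option.map_some]
        rw [if_neg (show ¬ (1 ≤ (i : Int) ∧ (i : Int) ≤ ((0 : Nat) : Int)) by omega)]
        simp
    | succ t ih =>
      have hsplit : PySem.List.pyRange 1 ((t + 1 : Nat) + 1) 1
          = PySem.List.pyRange 1 ((t : Nat) + 1) 1 ++ [((t : Nat) + 1 : Int)] := by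
        have := PySem.List.pyRange_one_succ_right (a := 1) (b := ((t : Nat) + 1)) (by omega)
        push_cast
        push_cast at this
        rw [this]
      rw [hsplit, List.foldl_append]
      obtain ⟨ih1, ih2⟩ := ih bs
      simp only [List.foldl_cons, List.foldl_nil]
      constructor
      · rw [List.length_modify, ih1]
      · intro i
        rw [List.getElem?_modify, ih2 i]
        have htn : (((t : Int) + 1).toNat) = t + 1 := by omega
        rw [htn]
        cases hb : bs[i]? with
        | none => simp
        | some b =>
          simp only [Option.map_some]
          split_ifs <;> simp_all <;> omega

-- folding the fill over the letters: bucket i collects, in letter order, the letters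
-- whose count is at least i (for 1 ≤ i), and stays empty at i = 0
theorem pv_fill_all (cnt : Char → Int) (L : List Char) (bs : List (List Char)) :
    ((L.foldl (fun bs c =>
        (PySem.List.pyRange 1 (cnt c + 1) 1).foldl (fun bs p => bs.modify p.toNat (· ++ [c])) bs)
      bs).length = bs.length)
    ∧ ∀ i : Nat,
      (L.foldl (fun bs c =>
          (PySem.List.pyRange 1 (cnt c + 1) 1).foldl (fun bs p => bs.modify p.toNat (· ++ [c])) bs)
        bs)[i]?
      = bs[i]?.map (fun b => b ++ if 1 ≤ (i : Int) then L.filter (fun c => decide ((i : Int) ≤ cnt c)) else []) := by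
  induction L generalizing bs with
  | nil =>
    refine ⟨rfl, fun i => ?_⟩
    cases hb : bs[i]? with
    | none => simp [hb]
    | some b => simp [hb]
  | cons c L ih =>
    simp only [List.foldl_cons]
    obtain ⟨f1, f2⟩ := pv_fill_one c (cnt c) bs
    obtain ⟨ih1, ih2⟩ := ih ((PySem.List.pyRange 1 (cnt c + 1) 1).foldl (fun bs p => bs.modify p.toNat (· ++ [c])) bs)
    refine ⟨by rw [ih1, f1], fun i => ?_⟩
    rw [ih2 i, f2 i]
    cases hb : bs[i]? with
    | none => simp
    | some b =>
      simp only [Option.map_some, List.filter_cons]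
      by_cases h1 : 1 ≤ (i : Int)
      · by_cases hc : (i : Int) ≤ cnt c
        · simp [h1, hc]
        · simp [h1, hc]
      · simp [h1]

-- ===== VERDICT (by name: the statement is the Claim_ definition above) =====
theorem function_spec : Claim_equal_function := by
  intro inputs _
  unfold Spec_function function function_alt
  dsimp only
  rw [pv_build_eq inputs.toList]
  set n := inputs.toList with hn
  set d0 := n.foldl (fun d ch => d.insert ch (d.getD ch 0 + 1))
    (PySem.Dict.empty : PySem.Dict Char Int) with hd0
  have hg0 : ∀ c, d0.getD c 0 = (n.count c : Int) := by
    intro c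
    rw [hd0, PySem.Dict.getD_foldl_insert_add_one]
    simp [List.count]
  have hk0 : d0.keys = pvK n := by
    rw [hd0, PySem.Dict.keys_foldl_insert (f := fun d x => d.getD x 0 + 1)]
    simp only [PySem.Dict.keys_empty]
    exact PySem.Set.update_nil_left n
  have hnodup0 : d0.keys.Nodup := hk0 ▸ PySem.Set.nodup_ofList n
  -- B's max is pvM n
  have hmax : (PySem.List.max? d0.values (fun x => x)).getD 0 = pvM n := by
    unfold pvM
    rw [PySem.Dict.values_eq_map_keys d0 hnodup0 0, hk0,
        List.map_congr_left (fun c _ => hg0 c)]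
  -- A's side via the loop invariant
  rw [pv_loop_eq n n.length 0 d0 [] le_rfl (by omega) hk0
      (fun c => by rw [hg0 c]; omega)
      (by simpa using pvM_le_len n)]
  -- B's side: the filled buckets
  rw [hmax]
  have hKS : PySem.List.sorted d0.keys (fun x : Char => x) false = pvS n := by
    rw [hk0]; rfl
  rw [hKS]
  set bs0 := (PySem.List.pyRange 0 (pvM n + 1) 1).map (fun _ => ([] : List Char)) with hbs0
  have hlen0 : bs0.length = (pvM n + 1).toNat := by
    rw [hbs0, List.length_map, PySem.List.length_pyRange_one]
    omega
  set bsF := (pvS n).foldl (fun bs c =>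
      (PySem.List.pyRange 1 (d0.getD c 0 + 1) 1).foldl (fun bs p => bs.modify p.toNat (· ++ [c])) bs)
    bs0 with hbsF
  obtain ⟨hfl, hfe⟩ := pv_fill_all (fun c => d0.getD c 0) (pvS n) bs0
  have hbucket : ∀ p : Int, 1 ≤ p → p ≤ pvM n →
      PySem.List.pyGetD bsF p [] = (pvS n).filter (fun c => decide (p ≤ (n.count c : Int))) := by
    intro p hp1 hpM
    have hplen : p.toNat < bsF.length := by
      rw [hbsF, hfl, hlen0]; omega
    rw [PySem.List.pyGetD_eq_getElem bsF ([] : List Char) (by omega) (by omega)]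
    have hg : bsF[p.toNat]? = some ((pvS n).filter (fun c => decide (p ≤ d0.getD c 0))) := by
      rw [hbsF, hfe p.toNat]
      have hb0 : bs0[p.toNat]? = some ([] : List Char) := by
        rw [hbs0]
        have hlt : p.toNat < ((PySem.List.pyRange 0 (pvM n + 1) 1).map
            (fun _ => ([] : List Char))).length := by
          rw [List.length_map, PySem.List.length_pyRange_one]; omega
        rw [List.getElem?_eq_getElem hlt, List.getElem_map]
      rw [hb0]
      have h1 : 1 ≤ ((p.toNat : Nat) : Int) := by omega
      have hcast : ((p.toNat : Nat) : Int) = p := by omega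
      simp only [Option.map_some, hcast, List.nil_append]
      rw [if_pos hp1]
    have := List.getElem?_eq_getElem hplen
    rw [this] at hg
    have hgv := Option.some.inj hg
    rw [hgv]
    exact List.filter_congr (fun c _ => by rw [hg0 c])
  -- read-out fold = flatMap of levels
  congr 1
  rw [PySem.List.foldl_append_eq_flatMap
    (g := fun p => if PySem.Int.mod p 2 == 0
      then (PySem.List.pyGetD bsF p []).reverse
      else PySem.List.pyGetD bsF p [])]
  rw [List.nil_append]
  unfold pvLevels
  rw [zero_add]
  apply List.flatMap_congr
  intro p hp
  obtain ⟨hp1, hp2⟩ := (PySem.List.mem_pyRange_one).mp hp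
  rw [hbucket p hp1 (by omega)]
  unfold pvLvl
  rfl
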